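-- pv_equiv track=rewrite | github.com/Iori-Pimentel/aoc-progress | python/2015/2015-3-code.py | solve
-- ===== SOURCE A (Python) =====
-- def solve(data, players):
--     directions = {"^": 1j, ">": 1, "v": -1j, "<": -1}
--     positions = [0] * players
--
--     visited = {0}
--     for i, d in enumerate(data):
--         positions[i % players] += directions[d]
--         visited |= {positions[i % players]}
--
--     return len(visited)
-- ===== SOURCE B (Python) =====
-- def solve(data, players):
--     lanes = {}
--     for i, c in enumerate(data):
--         lanes.setdefault(i % players, []).append(c)
--     visited = {0}
--     for lane in lanes.values():
--         pos = 0
--         for c in lane: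
--             pos += 1j ** ">^<v".index(c)
--             visited.add(pos)
--     return len(visited)
-- ===== Notes on version B (the rewrite author's own statement) =====
-- stated objective: alternative
-- what changed: B first groups the moves into a dict of per-player lanes keyed by i % players and then walks each lane independently with a single running position (direction computed as 1j ** ">^<v".index(c)), instead of A's single interleaved pass that mutates a per-player position list indexed by i % players.
import Mathlib
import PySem

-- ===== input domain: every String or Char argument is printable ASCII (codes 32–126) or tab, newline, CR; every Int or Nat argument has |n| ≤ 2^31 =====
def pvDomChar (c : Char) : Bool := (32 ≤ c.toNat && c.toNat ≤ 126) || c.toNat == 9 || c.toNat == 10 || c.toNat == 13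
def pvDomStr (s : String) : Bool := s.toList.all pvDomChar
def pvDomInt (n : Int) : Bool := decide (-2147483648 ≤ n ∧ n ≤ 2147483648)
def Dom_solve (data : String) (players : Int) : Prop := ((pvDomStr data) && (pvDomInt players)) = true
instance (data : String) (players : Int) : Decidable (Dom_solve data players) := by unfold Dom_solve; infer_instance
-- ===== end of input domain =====

-- B regroups the moves by player FIRST (a dict of per-player move lanes keyed by i % players) and then
-- walks each lane independently, instead of A's single interleaved pass over a mutable per-player
-- position array; objective: alternative, same O(n) cost.

-- ===== PORT A =====
-- complex numbers 1j/1/-1j/-1 are modelled as pairs (re, im) : Int × Int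
def solveDirs : PySem.Dict Char (Int × Int) :=
  PySem.Dict.ofList [('^', ((0:Int), (1:Int))), ('>', (1, 0)), ('v', (0, -1)), ('<', (-1, 0))]

def solve (data : String) (players : Int) : Int :=
  let positions : List (Int × Int) := List.replicate players.toNat ((0:Int), (0:Int))
  let res := (PySem.List.enumerate data.toList 0).foldl
    (fun (st : List (Int × Int) × PySem.Set (Int × Int)) (e : Int × Char) =>
      let idx := PySem.Int.mod e.1 players
      -- positions[i % players] and directions[d]: out-of-range / missing key raise in Python; Pre_ excludes those
      let cur := PySem.List.pyGetD st.1 idx ((0:Int), (0:Int))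
      let dv := (solveDirs.get? e.2).getD ((0:Int), (0:Int))
      let np := (cur.1 + dv.1, cur.2 + dv.2)
      (PySem.List.pySetD st.1 idx np, PySem.Set.add st.2 np))
    (positions, PySem.Set.ofList [((0:Int), (0:Int))])
  PySem.Set.len res.2

-- ===== PORT B =====
-- 1j ** k for a Nat k, ported by hand (exact: Gaussian-integer values of Python's small integer complex powers)
def altPowI : Nat → Int × Int
  | 0 => (1, 0)
  | k + 1 => ((-(altPowI k).2), (altPowI k).1)

def solve_alt (data : String) (players : Int) : Int :=
  let lanes := (PySem.List.enumerate data.toList 0).foldl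
    (fun (d : PySem.Dict Int (List Char)) (e : Int × Char) =>
      let k := PySem.Int.mod e.1 players
      -- lanes.setdefault(k, []).append(c) ported as: store the old list (or []) extended by c — exact
      d.insert k (d.getD k [] ++ [e.2]))
    PySem.Dict.empty
  let visited := lanes.values.foldl
    (fun (vis : PySem.Set (Int × Int)) (lane : List Char) =>
      (lane.foldl
        (fun (st : (Int × Int) × PySem.Set (Int × Int)) (c : Char) =>
          -- pos += 1j ** ">^<v".index(c); a missing char raises ValueError in Python, Pre_ excludes it
          let dv := altPowI ((PySem.List.index? ['>', '^', '<', 'v'] c).getD 0)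
          let np := (st.1.1 + dv.1, st.1.2 + dv.2)
          (np, PySem.Set.add st.2 np))
        (((0:Int), (0:Int)), vis)).2)
    (PySem.Set.ofList [((0:Int), (0:Int))])
  PySem.Set.len visited

-- ===== PRECONDITION & SPEC =====
-- Pre_ excludes exactly the inputs where A raises: a character outside "^>v<" (KeyError) or
-- players ≤ 0 with non-empty data (ZeroDivisionError / IndexError).
def Pre_solve (data : String) (players : Int) : Prop :=
  (data.toList.all (fun c => c == '^' || c == '>' || c == 'v' || c == '<') = true) ∧
  (data.toList = [] ∨ 1 ≤ players)
instance (data : String) (players : Int) : Decidable (Pre_solve data players) := by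
  unfold Pre_solve; infer_instance
def pvWitness_solve : String × Int := ("^>v<^", 2)

def Spec_solve (data : String) (players : Int) (out : Int) : Prop := out = solve_alt data players
instance (data : String) (players : Int) (out : Int) : Decidable (Spec_solve data players out) := by
  unfold Spec_solve; infer_instance

-- ===== CLAIM (what is proved, stated in full; the proofs are below) =====
def Claim_equal_solve : Prop := ∀ (data : String) (players : Int),
  Dom_solve data players → Pre_solve data players → Spec_solve data players (solve data players)

-- ===== LEMMAS AND PROOFS =====

-- the pure direction function both programs compute
def pvDir (c : Char) : Int × Int :=
  if c = '^' then (0, 1) else if c = '>' then (1, 0) else if c = 'v' then (0, -1)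
  else if c = '<' then (-1, 0) else (0, 0)

theorem solveDirs_get (c : Char) : (solveDirs.get? c).getD ((0:Int), (0:Int)) = pvDir c := by
  have h : solveDirs = PySem.Dict.mk [('^', ((0:Int), (1:Int))), ('>', (1, 0)), ('v', (0, -1)), ('<', (-1, 0))] := by rfl
  rw [h]
  simp [PySem.Dict.get?_mk_cons, pvDir]
  have h0 : ({ items := [] } : PySem.Dict Char (Int × Int)).get? c = none := by rfl
  rw [h0]
  split_ifs with h1 h2 h3 h4 <;> simp_all [eq_comm]
  rfl

theorem altPowI_dir (c : Char) (hc : c = '^' ∨ c = '>' ∨ c = 'v' ∨ c = '<') :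
    altPowI ((PySem.List.index? ['>', '^', '<', 'v'] c).getD 0) = pvDir c := by
  rcases hc with rfl | rfl | rfl | rfl <;> decide

-- running sum from s, and the list of its non-initial prefix sums
def pvRun (s : Int × Int) (l : List (Int × Int)) : Int × Int :=
  l.foldl (fun a b => (a.1 + b.1, a.2 + b.2)) s

def pvPsums : (Int × Int) → List (Int × Int) → List (Int × Int)
  | _, [] => []
  | s, v :: t => (s.1 + v.1, s.2 + v.2) :: pvPsums (s.1 + v.1, s.2 + v.2) t

theorem pvPsums_append (s : Int × Int) (l : List (Int × Int)) (v : Int × Int) :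
    pvPsums s (l ++ [v]) = pvPsums s l ++ [((pvRun s l).1 + v.1, (pvRun s l).2 + v.2)] := by
  induction l generalizing s with
  | nil => simp [pvPsums, pvRun]
  | cons x t ih => simp [pvPsums, pvRun, ih, List.foldl_cons]

-- the characters (resp. directions) player p consumes among the first m steps (indices ≡ p mod P below m)
def pvLane (ds : List Char) (P p m : Nat) : List Char :=
  (PySem.List.pyRange (p : Int) (m : Int) (P : Int)).map (fun i => PySem.List.pyGetD ds i ' ')

def pvGrp (ds : List Char) (P p m : Nat) : List (Int × Int) :=
  (pvLane ds P p m).map pvDir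

theorem pvModSub (p m P : Nat) (hpP : p < P) (hpm : p ≤ m) :
    (m % P = p) ↔ (m - p) % P = 0 := by
  obtain ⟨t, rfl⟩ : ∃ t, m = p + t := ⟨m - p, by omega⟩
  have hP : 0 < P := by omega
  have h1 : (p + t) % P = (p + t % P) % P := by
    conv_lhs => rw [Nat.add_mod, Nat.mod_eq_of_lt hpP]
  have hr : t % P < P := Nat.mod_lt _ hP
  simp only [Nat.add_sub_cancel_left, h1]
  by_cases hc : p + t % P < P
  · rw [Nat.mod_eq_of_lt hc]; omega
  · have h2 : (p + t % P) % P = p + t % P - P := by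
      rw [Nat.mod_eq_sub_mod (by omega), Nat.mod_eq_of_lt (by omega)]
    rw [h2]; omega

theorem pyRange_step_succ (p m P : Nat) (hP : 0 < P) (hpP : p < P) :
    PySem.List.pyRange (p : Int) ((m + 1 : Nat) : Int) (P : Int) =
      PySem.List.pyRange (p : Int) (m : Int) (P : Int) ++
        (if m % P = p then [(m : Int)] else []) := by
  have hPz : (0:Int) < (P : Int) := by exact_mod_cast hP
  rw [PySem.List.pyRange_of_pos _ _ hPz, PySem.List.pyRange_of_pos _ _ hPz]
  have hcount : ∀ (k : Nat), (if (p:Int) < (k:Int) then ((((k:Int) - p + P - 1)) / P).toNat else 0)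
      = (k - p + P - 1) / P := by
    intro k
    by_cases hpk : p < k
    · have heq : ((k:Int) - p + P - 1) = ((k - p + P - 1 : Nat) : Int) := by omega
      rw [if_pos (by exact_mod_cast hpk), heq]
      simp [← Int.natCast_ediv]
    · rw [if_neg (by exact_mod_cast hpk)]
      have h1 : k - p = 0 := by omega
      rw [h1, Nat.div_eq_of_lt (by omega)]
  rw [hcount m, hcount (m+1)]
  by_cases hpm : p ≤ m
  · have ht0 : m - p + P - 1 = P * ((m-p)/P) + ((m-p) % P + P - 1) := by
      have := Nat.div_add_mod (m - p) P
      have := Nat.mod_lt (m - p) hP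
      omega
    have ht1 : m + 1 - p + P - 1 = P * ((m-p)/P) + ((m-p) % P + P) := by
      have := Nat.div_add_mod (m - p) P
      omega
    rw [ht0, ht1, Nat.mul_add_div hP, Nat.mul_add_div hP]
    have hr : (m - p) % P < P := Nat.mod_lt _ hP
    by_cases hz : (m - p) % P = 0
    · rw [if_pos ((pvModSub p m P hpP hpm).2 hz), hz]
      have e1 : (0 + P) / P = 1 := by rw [Nat.zero_add]; exact Nat.div_self hP
      have e2 : (0 + P - 1) / P = 0 := by apply Nat.div_eq_of_lt; omega
      rw [e1, e2, Nat.add_zero, List.range_succ, List.map_append]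
      simp only [List.map_cons, List.map_nil]
      have hd := Nat.div_add_mod (m - p) P
      have hm : p + P * ((m - p) / P) = m := by omega
      congr 2
      exact_mod_cast hm
    · rw [if_neg (fun hc => hz ((pvModSub p m P hpP hpm).1 hc))]
      have e1 : ((m - p) % P + P) / P = 1 := by apply Nat.div_eq_of_lt_le <;> omega
      have e2 : ((m - p) % P + P - 1) / P = 1 := by apply Nat.div_eq_of_lt_le <;> omega
      rw [e1, e2]
      simp
  · have h1 : m - p = 0 := by omega
    have h2 : m + 1 - p = 0 := by omega
    rw [h1, h2, if_neg (by rw [Nat.mod_eq_of_lt (show m < P by omega)]; omega)]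
    simp

theorem pvLane_succ (ds : List Char) (P p m : Nat) (hP : 0 < P) (hpP : p < P) :
    pvLane ds P p (m + 1) =
      pvLane ds P p m ++ (if m % P = p then [PySem.List.pyGetD ds (m : Int) ' '] else []) := by
  unfold pvLane
  rw [pyRange_step_succ p m P hP hpP, List.map_append]
  by_cases h : m % P = p <;> simp [h]

theorem pvLane_zero (ds : List Char) (P p : Nat) (hP : 0 < P) :
    pvLane ds P p 0 = [] := by
  unfold pvLane
  rw [PySem.List.pyRange_of_pos _ _ (by exact_mod_cast hP)]
  rw [if_neg (by exact_mod_cast Nat.not_lt_zero p)]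
  simp

theorem pvLane_ge (ds : List Char) (P p m : Nat) (hP : 0 < P) (h : m ≤ p) :
    pvLane ds P p m = [] := by
  unfold pvLane
  rw [PySem.List.pyRange_of_pos _ _ (by exact_mod_cast hP)]
  rw [if_neg (by exact_mod_cast Nat.not_lt.2 h)]
  simp

theorem pvGrp_succ (ds : List Char) (P p m : Nat) (hP : 0 < P) (hpP : p < P) :
    pvGrp ds P p (m + 1) =
      pvGrp ds P p m ++ (if m % P = p then [pvDir (PySem.List.pyGetD ds (m : Int) ' ')] else []) := by
  unfold pvGrp
  rw [pvLane_succ ds P p m hP hpP, List.map_append]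
  by_cases h : m % P = p <;> simp [h]

theorem pvGrp_zero (ds : List Char) (P p : Nat) (hP : 0 < P) :
    pvGrp ds P p 0 = [] := by
  unfold pvGrp
  rw [pvLane_zero ds P p hP]
  rfl

theorem pvRun_append (s : Int × Int) (l : List (Int × Int)) (v : Int × Int) :
    pvRun s (l ++ [v]) = ((pvRun s l).1 + v.1, (pvRun s l).2 + v.2) := by
  simp [pvRun, List.foldl_append]

-- A's loop, re-indexed: state after the first m characters
def pvStA (ds : List Char) (players : Int) (m : Nat) : List (Int × Int) × PySem.Set (Int × Int) :=
  (List.range m).foldl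
    (fun (st : List (Int × Int) × PySem.Set (Int × Int)) (j : Nat) =>
      let idx := PySem.Int.mod (j : Int) players
      let cur := PySem.List.pyGetD st.1 idx ((0:Int), (0:Int))
      let dv := (solveDirs.get? (PySem.List.pyGetD ds (j : Int) ' ')).getD ((0:Int), (0:Int))
      let np := (cur.1 + dv.1, cur.2 + dv.2)
      (PySem.List.pySetD st.1 idx np, PySem.Set.add st.2 np))
    (List.replicate players.toNat ((0:Int), (0:Int)), PySem.Set.ofList [((0:Int), (0:Int))])

theorem solve_eq_stA (data : String) (players : Int) :
    solve data players = PySem.Set.len (pvStA data.toList players data.toList.length).2 := by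
  unfold solve pvStA
  rw [PySem.List.enumerate_eq_map_pyRange data.toList ' ']
  rw [show PySem.List.len data.toList = ((data.toList.length : Nat) : Int) from PySem.List.len_eq _]
  rw [PySem.List.pyRange_zero_natCast]
  simp only [List.foldl_map]

theorem pvStA_succ (ds : List Char) (players : Int) (m : Nat) :
    pvStA ds players (m + 1) =
      (let st := pvStA ds players m
       let idx := PySem.Int.mod (m : Int) players
       let cur := PySem.List.pyGetD st.1 idx ((0:Int), (0:Int))
       let dv := (solveDirs.get? (PySem.List.pyGetD ds (m : Int) ' ')).getD ((0:Int), (0:Int))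
       let np := (cur.1 + dv.1, cur.2 + dv.2)
       (PySem.List.pySetD st.1 idx np, PySem.Set.add st.2 np)) := by
  unfold pvStA
  rw [List.range_succ, List.foldl_append, List.foldl_cons, List.foldl_nil]

theorem pvInvA (ds : List Char) (P : Nat) (hP : 0 < P) (m : Nat) :
    (pvStA ds (P : Int) m).1.length = P ∧
    (∀ p, p < P → PySem.List.pyGetD (pvStA ds (P : Int) m).1 (p : Int) ((0:Int), (0:Int))
        = pvRun ((0:Int), (0:Int)) (pvGrp ds P p m)) ∧
    (∀ x, x ∈ (pvStA ds (P : Int) m).2 ↔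
        x = ((0:Int), (0:Int)) ∨ ∃ p, p < P ∧ x ∈ pvPsums ((0:Int), (0:Int)) (pvGrp ds P p m)) ∧
    (pvStA ds (P : Int) m).2.Nodup := by
  induction m with
  | zero =>
      refine ⟨by simp [pvStA], ?_, ?_, by simp [pvStA]⟩
      · intro p hp
        simp [pvStA, pvGrp_zero ds P p hP, pvRun, PySem.List.pyGetD_natCast]
      · intro x
        simp [pvStA, fun p => pvGrp_zero ds P p hP, pvPsums, PySem.Set.ofList]
  | succ m ih =>
      obtain ⟨h1, h2, h3, h4⟩ := ih
      have hmod : PySem.Int.mod ((m : Nat) : Int) ((P : Nat) : Int) = ((m % P : Nat) : Int) :=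
        PySem.Int.mod_natCast m P
      set p0 := m % P with hp0def
      have hp0 : p0 < P := Nat.mod_lt _ hP
      have hcur : PySem.List.pyGetD (pvStA ds (P : Int) m).1 ((p0 : Nat) : Int) ((0:Int), (0:Int))
          = pvRun ((0:Int), (0:Int)) (pvGrp ds P p0 m) := h2 p0 hp0
      have hnp : ((pvRun ((0:Int), (0:Int)) (pvGrp ds P p0 m)).1 + (pvDir (PySem.List.pyGetD ds (m : Int) ' ')).1,
                  (pvRun ((0:Int), (0:Int)) (pvGrp ds P p0 m)).2 + (pvDir (PySem.List.pyGetD ds (m : Int) ' ')).2)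
          = pvRun ((0:Int), (0:Int)) (pvGrp ds P p0 (m + 1)) := by
        rw [pvGrp_succ ds P p0 m hP hp0, if_pos rfl, pvRun_append]
      rw [pvStA_succ]
      simp only [hmod, solveDirs_get, hcur, hnp]
      refine ⟨?_, ?_, ?_, PySem.Set.nodup_add _ _ h4⟩
      · rw [PySem.List.length_pySetD]; exact h1
      · intro p hp
        rw [PySem.List.pyGetD_pySetD_natCast _ p0 p _ _ (by rw [h1]; exact hp0)]
        by_cases hpp : p = p0
        · rw [if_pos hpp, hpp]
        · rw [if_neg hpp, h2 p hp, pvGrp_succ ds P p m hP hp,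
            if_neg (fun hc => hpp (by omega)), List.append_nil]
      · intro x
        rw [PySem.Set.mem_add]
        constructor
        · rintro (hx | hx)
          · rcases (h3 x).1 hx with h | ⟨p, hp, hxp⟩
            · exact Or.inl h
            · refine Or.inr ⟨p, hp, ?_⟩
              rw [pvGrp_succ ds P p m hP hp]
              by_cases hpp : p0 = p
              · rw [if_pos hpp, pvPsums_append]
                exact List.mem_append_left _ hxp
              · rw [if_neg hpp, List.append_nil]; exact hxp
          · refine Or.inr ⟨p0, hp0, ?_⟩
            rw [pvGrp_succ ds P p0 m hP hp0, if_pos rfl, pvPsums_append]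
            exact List.mem_append_right _ (by rw [hx, ← hnp]; exact List.mem_singleton_self _)
        · rintro (hx | ⟨p, hp, hxp⟩)
          · exact Or.inl ((h3 x).2 (Or.inl hx))
          · by_cases hpp : p0 = p
            · subst hpp
              rw [pvGrp_succ ds P p0 m hP hp0, if_pos rfl, pvPsums_append] at hxp
              rcases List.mem_append.1 hxp with h | h
              · exact Or.inl ((h3 x).2 (Or.inr ⟨p0, hp0, h⟩))
              · exact Or.inr ((List.mem_singleton.1 h).trans hnp)
            · rw [pvGrp_succ ds P p m hP hp, if_neg hpp, List.append_nil] at hxp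
              exact Or.inl ((h3 x).2 (Or.inr ⟨p, hp, hxp⟩))

-- B's grouping loop: the lane dict after the first m characters
def pvStB (ds : List Char) (players : Int) (m : Nat) : PySem.Dict Int (List Char) :=
  (List.range m).foldl
    (fun (d : PySem.Dict Int (List Char)) (j : Nat) =>
      let k := PySem.Int.mod (j : Int) players
      d.insert k (d.getD k [] ++ [PySem.List.pyGetD ds (j : Int) ' ']))
    PySem.Dict.empty

theorem pvStB_succ (ds : List Char) (players : Int) (m : Nat) :
    pvStB ds players (m + 1) =
      (let d := pvStB ds players m
       let k := PySem.Int.mod (m : Int) players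
       d.insert k (d.getD k [] ++ [PySem.List.pyGetD ds (m : Int) ' '])) := by
  unfold pvStB
  rw [List.range_succ, List.foldl_append, List.foldl_cons, List.foldl_nil]

theorem pvInvB (ds : List Char) (P : Nat) (hP : 0 < P) (m : Nat) :
    (pvStB ds (P : Int) m).items
      = (List.range (min P m)).map (fun p : Nat => ((p : Int), pvLane ds P p m)) := by
  induction m with
  | zero => simp [pvStB, PySem.Dict.empty]
  | succ m ih =>
      have hmod : PySem.Int.mod ((m : Nat) : Int) ((P : Nat) : Int) = ((m % P : Nat) : Int) :=
        PySem.Int.mod_natCast m P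
      set p0 := m % P with hp0def
      have hp0 : p0 < P := Nat.mod_lt _ hP
      have hkeys : (pvStB ds (P : Int) m).keys = (List.range (min P m)).map (fun p : Nat => (p : Int)) := by
        simp only [PySem.Dict.keys, ih, List.map_map]
        rfl
      have hnd : (pvStB ds (P : Int) m).keys.Nodup := by
        rw [hkeys]
        exact (List.nodup_range).map (fun a b h => by exact_mod_cast h)
      have hcont : (pvStB ds (P : Int) m).contains ((p0 : Nat) : Int) = decide (p0 < min P m) := by
        rw [PySem.Dict.contains_eq_decide_mem_keys, hkeys]
        simp only [decide_eq_decide, List.mem_map, List.mem_range]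
        constructor
        · rintro ⟨a, ha, hc⟩
          have : a = p0 := by exact_mod_cast hc
          omega
        · intro h
          exact ⟨p0, h, rfl⟩
      rw [pvStB_succ]
      simp only [hmod]
      by_cases hm : m < P
      · -- new player index: key m is fresh
        have hp0m : p0 = m := by rw [hp0def, Nat.mod_eq_of_lt hm]
        have hmin : min P m = m := by omega
        have hmin1 : min P (m + 1) = m + 1 := by omega
        have hcf : (pvStB ds (P : Int) m).contains ((p0 : Nat) : Int) = false := by
          rw [hcont]; simp [hmin, hp0m]
        have hgetD : (pvStB ds (P : Int) m).getD ((p0 : Nat) : Int) [] = [] := by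
          have hnone : (pvStB ds (P : Int) m).get? ((p0 : Nat) : Int) = none := by
            rw [PySem.Dict.get?_eq_none_iff_not_mem_keys, hkeys]
            simp only [List.mem_map, List.mem_range, hmin, hp0m]
            rintro ⟨a, ha, hc⟩
            have : a = m := by exact_mod_cast hc
            omega
          simp [PySem.Dict.getD, hnone]
        rw [PySem.Dict.items_insert_of_not_contains _ _ hcf, ih, hgetD, hmin, hmin1,
          List.range_succ, List.map_append]
        congr 1
        · apply List.map_congr_left
          intro p hp
          rw [List.mem_range] at hp
          have : p < P := by omega
          rw [pvLane_succ ds P p m hP this, if_neg (by omega), List.append_nil]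
        · simp only [List.map_cons, List.map_nil, hp0m]
          rw [pvLane_succ ds P m m hP hm, pvLane_ge ds P m m hP (le_refl m),
            if_pos (by rw [Nat.mod_eq_of_lt hm]), List.nil_append]
      · -- existing player index p0 < P ≤ m: overwrite in place
        have hmin : min P m = P := by omega
        have hmin1 : min P (m + 1) = P := by omega
        have hct : (pvStB ds (P : Int) m).contains ((p0 : Nat) : Int) = true := by
          rw [hcont]; simp [hmin, hp0]
        have hmem : (((p0 : Nat) : Int), pvLane ds P p0 m) ∈ (pvStB ds (P : Int) m).items := by
          rw [ih, hmin]
          exact List.mem_map.2 ⟨p0, List.mem_range.2 hp0, rfl⟩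
        have hgetD : (pvStB ds (P : Int) m).getD ((p0 : Nat) : Int) [] = pvLane ds P p0 m :=
          PySem.Dict.getD_of_mem_items _ hmem hnd []
        rw [PySem.Dict.items_insert_of_contains _ _ hct, ih, hgetD, hmin, hmin1, List.map_map]
        apply List.map_congr_left
        intro p hp
        rw [List.mem_range] at hp
        simp only [Function.comp]
        by_cases hpp : p = p0
        · subst hpp
          rw [if_pos (by simp), pvLane_succ ds P p0 m hP hp, if_pos hp0def.symm]
        · have hne : ¬ ((((p : Nat) : Int), pvLane ds P p m).1 == ((p0 : Nat) : Int)) = true := by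
            simp only [beq_iff_eq]
            intro h
            exact hpp (by exact_mod_cast h)
          rw [if_neg hne, pvLane_succ ds P p m hP hp, if_neg (fun hc => hpp (by omega)),
            List.append_nil]

-- B's inner walk over one lane of characters
theorem pvInnerB (lane : List Char)
    (hlane : ∀ c ∈ lane, c = '^' ∨ c = '>' ∨ c = 'v' ∨ c = '<')
    (s : Int × Int) (vis : PySem.Set (Int × Int)) :
    lane.foldl (fun (st : (Int × Int) × PySem.Set (Int × Int)) (c : Char) =>
        let dv := altPowI ((PySem.List.index? ['>', '^', '<', 'v'] c).getD 0)
        let np := (st.1.1 + dv.1, st.1.2 + dv.2)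
        (np, PySem.Set.add st.2 np)) (s, vis)
      = (pvRun s (lane.map pvDir), PySem.Set.update vis (pvPsums s (lane.map pvDir))) := by
  induction lane generalizing s vis with
  | nil => simp [pvRun, pvPsums, PySem.Set.update]
  | cons c t ih =>
      rw [List.foldl_cons, ih (fun x hx => hlane x (List.mem_cons_of_mem _ hx))]
      simp only [List.map_cons, altPowI_dir c (hlane c (List.mem_cons_self)), pvPsums,
        PySem.Set.update_cons]
      rfl

-- dropping trailing players whose lane is empty from the outer fold
theorem pvOuterB_drop (g : Nat → List (Int × Int)) (m k : Nat)
    (hg : ∀ p, m ≤ p → p < m + k → g p = []) (vis : PySem.Set (Int × Int)) :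
    (List.range (m + k)).foldl (fun (vis : PySem.Set (Int × Int)) (p : Nat) =>
        PySem.Set.update vis (pvPsums ((0:Int), (0:Int)) (g p))) vis
      = (List.range m).foldl (fun (vis : PySem.Set (Int × Int)) (p : Nat) =>
        PySem.Set.update vis (pvPsums ((0:Int), (0:Int)) (g p))) vis := by
  induction k with
  | zero => rfl
  | succ k ih =>
      rw [show m + (k + 1) = (m + k) + 1 from rfl, List.range_succ, List.foldl_append,
        List.foldl_cons, List.foldl_nil, hg (m + k) (by omega) (by omega)]
      exact ih (fun p h1 h2 => hg p h1 (by omega))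

theorem solve_alt_eq (data : String) (P : Nat) (hP : 0 < P)
    (hdata : ∀ c ∈ data.toList, c = '^' ∨ c = '>' ∨ c = 'v' ∨ c = '<') :
    solve_alt data (P : Int) = PySem.Set.len
      ((List.range P).foldl
        (fun (vis : PySem.Set (Int × Int)) (p : Nat) =>
          PySem.Set.update vis (pvPsums ((0:Int), (0:Int)) (pvGrp data.toList P p data.toList.length)))
        (PySem.Set.ofList [((0:Int), (0:Int))])) := by
  set ds := data.toList with hds
  set n := ds.length with hn
  have hlanes : ((PySem.List.enumerate ds 0).foldl
      (fun (d : PySem.Dict Int (List Char)) (e : Int × Char) =>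
        d.insert (PySem.Int.mod e.1 (P : Int))
          (d.getD (PySem.Int.mod e.1 (P : Int)) [] ++ [e.2]))
      PySem.Dict.empty) = pvStB ds (P : Int) n := by
    unfold pvStB
    rw [PySem.List.enumerate_eq_map_pyRange ds ' ']
    rw [show PySem.List.len ds = ((n : Nat) : Int) from PySem.List.len_eq _]
    rw [PySem.List.pyRange_zero_natCast]
    simp only [List.foldl_map]
  have hmem : ∀ p : Nat, ∀ c ∈ pvLane ds P p n, c = '^' ∨ c = '>' ∨ c = 'v' ∨ c = '<' := by
    intro p c hc
    unfold pvLane at hc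
    rcases List.mem_map.1 hc with ⟨i, hi, rfl⟩
    rcases (PySem.List.mem_pyRange_iff_of_pos
      (show (0:Int) < (P : Int) by exact_mod_cast hP) i).1 hi with ⟨hi1, hi2, -⟩
    have hi0 : (0:Int) ≤ i := le_trans (by exact_mod_cast Nat.zero_le p) hi1
    apply hdata
    rw [PySem.List.pyGetD_of_nonneg ds _ hi0]
    have hlt : i.toNat < ds.length := by omega
    rw [List.getD_eq_getElem ds ' ' hlt]
    exact List.getElem_mem hlt
  unfold solve_alt
  show PySem.Set.len
      (((PySem.List.enumerate ds 0).foldl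
          (fun (d : PySem.Dict Int (List Char)) (e : Int × Char) =>
            d.insert (PySem.Int.mod e.1 (P : Int))
              (d.getD (PySem.Int.mod e.1 (P : Int)) [] ++ [e.2]))
          PySem.Dict.empty).values.foldl
        (fun (vis : PySem.Set (Int × Int)) (lane : List Char) =>
          (lane.foldl
            (fun (st : (Int × Int) × PySem.Set (Int × Int)) (c : Char) =>
              let dv := altPowI ((PySem.List.index? ['>', '^', '<', 'v'] c).getD 0)
              let np := (st.1.1 + dv.1, st.1.2 + dv.2)
              (np, PySem.Set.add st.2 np))
            (((0:Int), (0:Int)), vis)).2)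
        (PySem.Set.ofList [((0:Int), (0:Int))])) = _
  rw [hlanes]
  have hvals : (pvStB ds (P : Int) n).values = (List.range (min P n)).map (fun p : Nat => pvLane ds P p n) := by
    simp only [PySem.Dict.values, pvInvB ds P hP n, List.map_map]
    rfl
  rw [hvals, List.foldl_map]
  rw [PySem.List.foldl_congr_mem (List.range (min P n)) _
    (fun (vis : PySem.Set (Int × Int)) (p : Nat) =>
      PySem.Set.update vis (pvPsums ((0:Int), (0:Int)) (pvGrp ds P p n)))
    (PySem.Set.ofList [((0:Int), (0:Int))])
    (fun acc p hp => by rw [pvInnerB _ (hmem p) _ acc]; rfl)]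
  have hdrop := pvOuterB_drop (fun p => pvGrp ds P p n) (min P n) (P - min P n)
    (fun p h1 h2 => by
      show pvGrp ds P p n = []
      unfold pvGrp
      rw [pvLane_ge ds P p n hP (by omega)]
      rfl)
    (PySem.Set.ofList [((0:Int), (0:Int))])
  rw [show min P n + (P - min P n) = P from by omega] at hdrop
  rw [hdrop]

theorem pvOuterB_mem (g : Nat → List (Int × Int)) (ps : List Nat) (vis : PySem.Set (Int × Int)) (x : Int × Int) :
    (x ∈ ps.foldl (fun (vis : PySem.Set (Int × Int)) (p : Nat) =>
        PySem.Set.update vis (pvPsums ((0:Int), (0:Int)) (g p))) vis)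
      ↔ x ∈ vis ∨ ∃ p ∈ ps, x ∈ pvPsums ((0:Int), (0:Int)) (g p) := by
  induction ps generalizing vis with
  | nil => simp
  | cons q t ih =>
      simp only [List.foldl_cons, ih, PySem.Set.mem_update, List.mem_cons]
      constructor
      · rintro ((h | h) | ⟨p, hp, hx⟩)
        · exact Or.inl h
        · exact Or.inr ⟨q, Or.inl rfl, h⟩
        · exact Or.inr ⟨p, Or.inr hp, hx⟩
      · rintro (h | ⟨p, (rfl | hp), hx⟩)
        · exact Or.inl (Or.inl h)
        · exact Or.inl (Or.inr hx)
        · exact Or.inr ⟨p, hp, hx⟩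

theorem pvOuterB_nodup (g : Nat → List (Int × Int)) (ps : List Nat) (vis : PySem.Set (Int × Int))
    (h : vis.Nodup) :
    (ps.foldl (fun (vis : PySem.Set (Int × Int)) (p : Nat) =>
        PySem.Set.update vis (pvPsums ((0:Int), (0:Int)) (g p))) vis).Nodup := by
  induction ps generalizing vis with
  | nil => exact h
  | cons q t ih => exact ih _ (PySem.Set.nodup_update _ _ h)

-- ===== VERDICT (by name: the statement is the Claim_ definition above) =====
theorem solve_spec : Claim_equal_solve := by
  intro data players _ hpre
  unfold Spec_solve
  have hdata : ∀ c ∈ data.toList, c = '^' ∨ c = '>' ∨ c = 'v' ∨ c = '<' := by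
    intro c hc
    have := List.all_eq_true.1 hpre.1 c hc
    simp only [Bool.or_eq_true, beq_iff_eq] at this
    tauto
  by_cases hp1 : 1 ≤ players
  · have hPe : players = ((players.toNat : Nat) : Int) := (Int.toNat_of_nonneg (by omega)).symm
    set P := players.toNat with hPdef
    have hP : 0 < P := by omega
    rw [hPe, solve_eq_stA, solve_alt_eq data P hP hdata]
    obtain ⟨h1, h2, h3, h4⟩ := pvInvA data.toList P hP data.toList.length
    have hndB := pvOuterB_nodup (fun p => pvGrp data.toList P p data.toList.length)
      (List.range P) (PySem.Set.ofList [((0:Int), (0:Int))]) (PySem.Set.nodup_ofList _)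
    have hperm : ((pvStA data.toList (P : Int) data.toList.length).2).Perm
        ((List.range P).foldl
          (fun (vis : PySem.Set (Int × Int)) (p : Nat) =>
            PySem.Set.update vis (pvPsums ((0:Int), (0:Int)) (pvGrp data.toList P p data.toList.length)))
          (PySem.Set.ofList [((0:Int), (0:Int))])) := by
      rw [List.perm_ext_iff_of_nodup h4 hndB]
      intro x
      rw [h3 x, pvOuterB_mem]
      simp [PySem.Set.mem_ofList, List.mem_range]
    show ((pvStA data.toList (P : Int) data.toList.length).2.length : Int) = _
    exact_mod_cast congrArg Int.ofNat hperm.length_eq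
  · rcases hpre.2 with h0 | h0
    · have hA : solve data players = 1 := by
        rw [solve_eq_stA, h0]
        rfl
      have hB : solve_alt data players = 1 := by
        unfold solve_alt
        rw [h0]
        rfl
      rw [hA, hB]
    · omega
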